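-- pv_equiv track=rewrite | github.com/FujitsuResearch/LSPWD | utils/periodic_detection_helper.py | align_strings
-- ===== SOURCE A (Python) =====
-- def align_strings(s1, s2):
--     len1 = len(s1)
--     len2 = len(s2)
--     max_matches = 0
--     best_offset = 0
--     for offset in range(-len2 + 1, len1):
--         match_count = 0
--         for i in range(len1):
--             j = i - offset
--             if 0 <= j < len2 and s1[i] == s2[j]:
--                 match_count += 1
--         if match_count > max_matches:
--             max_matches = match_count
--             best_offset = offset
--     return best_offset, max_matches
-- ===== SOURCE B (Python) =====
-- def align_strings(s1, s2):
--     # Index s2's positions per character, count matching pairs per offset in one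
--     # pass over s1, then scan the occurring offsets in increasing order.
--     positions = {}
--     for j, c in enumerate(s2):
--         positions.setdefault(c, []).append(j)
--     counts = {}
--     for i, c in enumerate(s1):
--         for j in positions.get(c, []):
--             off = i - j
--             counts[off] = counts.get(off, 0) + 1
--     best_offset = 0
--     max_matches = 0
--     for off in sorted(counts):
--         if counts[off] > max_matches:
--             max_matches = counts[off]
--             best_offset = off
--     return best_offset, max_matches
-- ===== Notes on version B (the rewrite author's own statement) =====
-- stated objective: alternative
-- what changed: Instead of rescanning all of s1 for every candidate offset, B indexes s2's positions per character once, accumulates per-offset match counts in one dict pass over the matching character pairs, and then scans only the occurring offsets in increasing order.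
import Mathlib
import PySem

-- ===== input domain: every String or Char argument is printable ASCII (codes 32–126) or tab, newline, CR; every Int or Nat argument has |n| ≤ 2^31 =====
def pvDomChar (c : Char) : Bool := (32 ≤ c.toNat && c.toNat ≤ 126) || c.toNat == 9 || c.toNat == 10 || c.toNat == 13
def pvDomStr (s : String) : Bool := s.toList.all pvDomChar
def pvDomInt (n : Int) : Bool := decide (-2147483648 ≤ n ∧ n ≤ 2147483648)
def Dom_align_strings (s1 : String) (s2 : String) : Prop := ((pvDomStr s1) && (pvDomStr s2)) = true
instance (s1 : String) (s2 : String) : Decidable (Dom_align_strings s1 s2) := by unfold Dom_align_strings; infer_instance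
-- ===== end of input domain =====

-- B replaces A's per-offset rescans of s1 by a per-character position index of s2 and
-- one dict of per-offset match counts, then scans the occurring offsets in increasing
-- order (objective: alternative; cost moves from offsets*|s1| to the number of matching pairs).

-- ===== PORT A =====
def align_strings (s1 : String) (s2 : String) : List Int :=
  let l1 := s1.toList
  let l2 := s2.toList
  let len1 : Int := l1.length
  let len2 : Int := l2.length
  let r := (PySem.List.pyRange (-len2 + 1) len1 1).foldl
    (fun (st : Int × Int) offset =>
      let mc := (PySem.List.pyRange 0 len1 1).foldl
        (fun (m : Int) i =>
          if 0 ≤ i - offset ∧ i - offset < len2 ∧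
              PySem.List.pyGetD l1 i ' ' = PySem.List.pyGetD l2 (i - offset) ' '
          then m + 1 else m) 0
      if mc > st.1 then (mc, offset) else st) ((0 : Int), (0 : Int))
  [r.2, r.1]

-- ===== PORT B =====
def align_strings_alt (s1 : String) (s2 : String) : List Int :=
  let l1 := s1.toList
  let l2 := s2.toList
  let positions : PySem.Dict Char (List Int) :=
    (PySem.List.enumerate l2 0).foldl
      (fun d p => d.modify p.2 [] (fun js => js ++ [p.1])) PySem.Dict.empty
  let counts : PySem.Dict Int Int :=
    (PySem.List.enumerate l1 0).foldl
      (fun d p =>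
        (positions.getD p.2 []).foldl (fun d j => d.modify (p.1 - j) 0 (· + 1)) d)
      PySem.Dict.empty
  let r := (PySem.List.sorted counts.keys (fun x => x)).foldl
    (fun (st : Int × Int) off =>
      if counts.getD off 0 > st.2 then (off, counts.getD off 0) else st)
    ((0 : Int), (0 : Int))
  [r.1, r.2]

-- ===== PRECONDITION & SPEC =====
def Spec_align_strings (s1 : String) (s2 : String) (out : List Int) : Prop := out = align_strings_alt s1 s2
instance (s1 : String) (s2 : String) (out : List Int) : Decidable (Spec_align_strings s1 s2 out) := by unfold Spec_align_strings; infer_instance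

-- ===== CLAIM (what is proved, stated in full; the proofs are below) =====
def Claim_equal_align_strings : Prop := ∀ (s1 : String) (s2 : String), Dom_align_strings s1 s2 → Spec_align_strings s1 s2 (align_strings s1 s2)

-- ===== LEMMAS AND PROOFS =====

def posL (l2 : List Char) (c : Char) : List Int :=
  (PySem.List.pyRange 0 l2.length 1).filter (fun j => PySem.List.pyGetD l2 j ' ' == c)

theorem positions_getD (l2 : List Char) (c : Char) :
    ((PySem.List.enumerate l2 0).foldl
      (fun (d : PySem.Dict Char (List Int)) p => d.modify p.2 [] (fun js => js ++ [p.1]))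
      PySem.Dict.empty).getD c [] = posL l2 c := by
  have h1 : (PySem.List.enumerate l2 0).foldl
      (fun (d : PySem.Dict Char (List Int)) p => d.modify p.2 [] (fun js => js ++ [p.1]))
      PySem.Dict.empty
      = ((PySem.List.enumerate l2 0).map Prod.swap).foldl
      (fun (d : PySem.Dict Char (List Int)) q => d.modify q.1 [] (fun js => js ++ [q.2]))
      PySem.Dict.empty := by
    rw [List.foldl_map]; rfl
  rw [h1, PySem.Dict.getD_foldl_modify_append]
  rw [show PySem.List.enumerate l2 0 = PySem.List.enumerate l2 from rfl,
      PySem.List.enumerate_eq_map_pyRange l2 ' ']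
  simp [List.map_map, List.filter_map, posL, Function.comp_def, PySem.List.len]

theorem mem_posL (l2 : List Char) (c : Char) (j : Int) :
    j ∈ posL l2 c ↔ 0 ≤ j ∧ j < (l2.length : Int) ∧ PySem.List.pyGetD l2 j ' ' = c := by
  simp [posL, List.mem_filter, PySem.List.mem_pyRange_one, and_assoc]


theorem nodup_posL (l2 : List Char) (c : Char) : (posL l2 c).Nodup :=
  (PySem.List.nodup_pyRange_one _ _).filter _

def offsL (l1 l2 : List Char) : List Int :=
  (PySem.List.pyRange 0 l1.length 1).flatMap
    (fun i => (posL l2 (PySem.List.pyGetD l1 i ' ')).map (fun j => i - j))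

theorem count_flat_aux (g : Int → List Int) (p : Int → Bool) (off : Int) (l : List Int)
    (h : ∀ i ∈ l, (g i).count off = if p i then 1 else 0) :
    (l.flatMap g).count off = l.countP p := by
  induction l with
  | nil => simp
  | cons x xs ih =>
    simp only [List.flatMap_cons, List.count_append, List.countP_cons]
    rw [h x (by simp), ih (fun i hi => h i (by simp [hi]))]
    by_cases hp : p x <;> simp [hp, Nat.add_comm]

theorem count_one (l1 l2 : List Char) (off i : Int) :
    ((posL l2 (PySem.List.pyGetD l1 i ' ')).map (fun j => i - j)).count off
      = if (0 ≤ i - off ∧ i - off < (l2.length : Int) ∧ PySem.List.pyGetD l1 i ' ' = PySem.List.pyGetD l2 (i - off) ' ') then 1 else 0 := by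
  have hf : Function.Injective (fun j : Int => i - j) := fun a b h => by
    simp only at h; omega
  have h2 : ((posL l2 (PySem.List.pyGetD l1 i ' ')).map (fun j => i - j)).count off
      = (posL l2 (PySem.List.pyGetD l1 i ' ')).count (i - off) := by
    have := List.count_map_of_injective (posL l2 (PySem.List.pyGetD l1 i ' '))
      (fun j : Int => i - j) hf (i - off)
    simpa [sub_sub_cancel] using this
  rw [h2]
  by_cases hm : (0 ≤ i - off ∧ i - off < (l2.length : Int) ∧ PySem.List.pyGetD l1 i ' ' = PySem.List.pyGetD l2 (i - off) ' ')
  · rw [if_pos hm]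
    exact List.count_eq_one_of_mem (nodup_posL _ _)
      ((mem_posL _ _ _).mpr ⟨hm.1, hm.2.1, hm.2.2.symm⟩)
  · rw [if_neg hm, List.count_eq_zero]
    intro hmem
    obtain ⟨a, b, c⟩ := (mem_posL _ _ _).mp hmem
    exact hm ⟨a, b, c.symm⟩

theorem count_offs (l1 l2 : List Char) (off : Int) :
    (offsL l1 l2).count off
      = (PySem.List.pyRange 0 l1.length 1).countP (fun i => decide ((0 ≤ i - off ∧ i - off < (l2.length : Int) ∧ PySem.List.pyGetD l1 i ' ' = PySem.List.pyGetD l2 (i - off) ' '))) := by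
  exact count_flat_aux _ _ _ _ (fun i _ => by
    rw [count_one]; by_cases hm : (0 ≤ i - off ∧ i - off < (l2.length : Int) ∧ PySem.List.pyGetD l1 i ' ' = PySem.List.pyGetD l2 (i - off) ' ') <;> simp [hm])

def cntA (l1 l2 : List Char) (off : Int) : Int :=
  (PySem.List.pyRange 0 l1.length 1).foldl
    (fun m i => if (0 ≤ i - off ∧ i - off < (l2.length : Int) ∧ PySem.List.pyGetD l1 i ' ' = PySem.List.pyGetD l2 (i - off) ' ') then m + 1 else m) 0

theorem cntA_eq (l1 l2 : List Char) (off : Int) :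
    cntA l1 l2 off = ((offsL l1 l2).count off : Int) := by
  unfold cntA
  rw [count_offs]
  have := PySem.List.foldl_count_if (fun i => decide ((0 ≤ i - off ∧ i - off < (l2.length : Int) ∧ PySem.List.pyGetD l1 i ' ' = PySem.List.pyGetD l2 (i - off) ' ')))
    (PySem.List.pyRange 0 l1.length 1) 0
  simp only [decide_eq_true_eq] at this
  rw [this]
  simp

theorem counts_eq_counter (l1 l2 : List Char) :
    (PySem.List.enumerate l1 0).foldl
      (fun (d : PySem.Dict Int Int) p =>
        ((((PySem.List.enumerate l2 0).foldl
          (fun (d : PySem.Dict Char (List Int)) p => d.modify p.2 [] (fun js => js ++ [p.1]))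
          PySem.Dict.empty)).getD p.2 []).foldl (fun d j => d.modify (p.1 - j) 0 (· + 1)) d)
      PySem.Dict.empty = PySem.Dict.counter (offsL l1 l2) := by
  simp only [positions_getD]
  rw [show PySem.List.enumerate l1 0 = PySem.List.enumerate l1 from rfl,
      PySem.List.enumerate_eq_map_pyRange l1 ' ', List.foldl_map]
  rw [PySem.Dict.counter_eq_foldl, offsL, List.foldl_flatMap]
  simp only [List.foldl_map]
  rfl

theorem mem_offsL (l1 l2 : List Char) (off : Int) :
    off ∈ offsL l1 l2 →
      -(l2.length : Int) + 1 ≤ off ∧ off < (l1.length : Int) := by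
  intro h
  simp only [offsL, List.mem_flatMap, List.mem_map] at h
  obtain ⟨i, hi, j, hj, hoff⟩ := h
  rw [PySem.List.mem_pyRange_one] at hi
  obtain ⟨hj0, hj1, -⟩ := (mem_posL _ _ _).mp hj
  omega

theorem foldA_filter (l1 l2 : List Char) (l : List Int) (st : Int × Int) (h : 0 ≤ st.1) :
    l.foldl (fun st off => if cntA l1 l2 off > st.1 then (cntA l1 l2 off, off) else st) st
      = (l.filter (fun off => decide (0 < (offsL l1 l2).count off))).foldl
          (fun st off => if cntA l1 l2 off > st.1 then (cntA l1 l2 off, off) else st) st := by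
  induction l generalizing st with
  | nil => rfl
  | cons x xs ih =>
    by_cases hx : 0 < (offsL l1 l2).count x
    · have hx' : decide (0 < (offsL l1 l2).count x) = true := decide_eq_true hx
      simp only [List.foldl_cons, List.filter_cons, hx', if_true]
      by_cases hgt : cntA l1 l2 x > st.1
      · rw [if_pos hgt]
        exact ih _ (by simp [cntA_eq])
      · rw [if_neg hgt]
        exact ih _ h
    · have hx' : decide (0 < (offsL l1 l2).count x) = false := decide_eq_false hx
      have hz : cntA l1 l2 x = 0 := by rw [cntA_eq]; omega
      simp only [List.foldl_cons, List.filter_cons, hx', Bool.false_eq_true, if_false]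
      rw [if_neg (by rw [hz]; omega)]
      exact ih _ h

theorem sorted_keys_eq (l1 l2 : List Char) :
    PySem.List.sorted (PySem.Set.ofList (offsL l1 l2)) (fun x => x)
      = (PySem.List.pyRange (-(l2.length : Int) + 1) l1.length 1).filter
          (fun off => decide (0 < (offsL l1 l2).count off)) := by
  apply PySem.List.sorted_eq_of_perm_of_pairwise_lt
  · apply (List.perm_ext_iff_of_nodup ((PySem.List.nodup_pyRange_one _ _).filter _)
      (PySem.Set.nodup_ofList _)).mpr
    intro off
    simp only [List.mem_filter, PySem.Set.mem_ofList, PySem.List.mem_pyRange_one,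
      decide_eq_true_eq]
    constructor
    · rintro ⟨-, hc⟩; exact List.count_pos_iff.mp hc
    · intro hm
      exact ⟨⟨(mem_offsL l1 l2 off hm).1, (mem_offsL l1 l2 off hm).2⟩,
        List.count_pos_iff.mpr hm⟩
  · exact (PySem.List.pairwise_lt_pyRange_one _ _).filter _

theorem fold_swap (l1 l2 : List Char) (l : List Int) (a b : Int) :
    l.foldl (fun (st : Int × Int) off =>
        if ((offsL l1 l2).count off : Int) > st.2 then (off, ((offsL l1 l2).count off : Int)) else st) (a, b)
      = ((l.foldl (fun st off => if cntA l1 l2 off > st.1 then (cntA l1 l2 off, off) else st) (b, a)).2,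
         (l.foldl (fun st off => if cntA l1 l2 off > st.1 then (cntA l1 l2 off, off) else st) (b, a)).1) := by
  induction l generalizing a b with
  | nil => rfl
  | cons x xs ih =>
    simp only [List.foldl_cons]
    by_cases hgt : ((offsL l1 l2).count x : Int) > b
    · rw [if_pos hgt, if_pos (by rw [cntA_eq]; exact hgt)]
      rw [cntA_eq]
      exact ih _ _
    · rw [if_neg hgt, if_neg (by rw [cntA_eq]; exact hgt)]
      exact ih _ _

theorem main_eq (s1 s2 : String) : align_strings s1 s2 = align_strings_alt s1 s2 := by
  unfold align_strings align_strings_alt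
  dsimp only
  rw [counts_eq_counter s1.toList s2.toList]
  rw [PySem.Dict.keys_counter]
  rw [sorted_keys_eq s1.toList s2.toList]
  simp only [PySem.Dict.getD_counter]
  rw [fold_swap s1.toList s2.toList]
  rw [← foldA_filter s1.toList s2.toList _ ((0:Int),(0:Int)) (by norm_num)]
  rfl

-- ===== VERDICT (by name: the statement is the Claim_ definition above) =====
theorem align_strings_spec : Claim_equal_align_strings := by
  intro s1 s2 _
  unfold Spec_align_strings
  exact main_eq s1 s2
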